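-- pv_equiv track=rewrite | github.com/code404nul/ORAL | test.py | validate_vad_signals
-- ===== SOURCE A (Python) =====
-- def validate_vad_signals(signals: dict) -> bool:
--     expected = {
--         "arousal_cues": {
--             "rapid_editing":      (0, 2),
--             "physical_action":    (0, 2),
--             "emotional_outburst": (0, 2),
--             "tense_confrontation":(0, 2),
--             "close_up_intensity": (0, 1),
--         },
--         "valence_cues": {
--             "darkness_shadow": (0, 2),
--             "death_loss":      (0, 2),
--             "joy_celebration": (0, 2),
--             "threat_danger":   (0, 2),
--         },
--         "neutral_indicators": {
--             "establishing_shot": (0, 1),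
--             "static_dialogue":   (0, 1),
--             "scene_transition":  (0, 1),
--         },
--     }
--     for group, fields in expected.items():
--         if group not in signals:
--             return False
--         for field, (min_v, max_v) in fields.items():
--             if field not in signals[group]:
--                 return False
--             val = signals[group][field]
--             if not isinstance(val, (int, float)):
--                 return False
--             if not (min_v <= val <= max_v):
--                 return False
--     return True
-- ===== SOURCE B (Python) =====
-- REQUIRED = {
--     ("arousal_cues", "rapid_editing"): (0, 2),
--     ("arousal_cues", "physical_action"): (0, 2),
--     ("arousal_cues", "emotional_outburst"): (0, 2),
--     ("arousal_cues", "tense_confrontation"): (0, 2),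
--     ("arousal_cues", "close_up_intensity"): (0, 1),
--     ("valence_cues", "darkness_shadow"): (0, 2),
--     ("valence_cues", "death_loss"): (0, 2),
--     ("valence_cues", "joy_celebration"): (0, 2),
--     ("valence_cues", "threat_danger"): (0, 2),
--     ("neutral_indicators", "establishing_shot"): (0, 1),
--     ("neutral_indicators", "static_dialogue"): (0, 1),
--     ("neutral_indicators", "scene_transition"): (0, 1),
-- }
--
--
-- def validate_vad_signals(signals: dict) -> bool:
--     # Inverted traversal: scan the INPUT once, collecting which requirements
--     # it satisfies, then ask whether every requirement was met.
--     satisfied = {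
--         (group, field)
--         for group, fields in signals.items()
--         for field, val in fields.items()
--         if (group, field) in REQUIRED
--         and isinstance(val, (int, float))
--         and REQUIRED[(group, field)][0] <= val <= REQUIRED[(group, field)][1]
--     }
--     return all(key in satisfied for key in REQUIRED)
-- ===== Notes on version B (the rewrite author's own statement) =====
-- stated objective: alternative
-- what changed: Inverts the traversal: instead of walking the fixed nested schema and looking each entry up in the input, B scans the input dict once with a set comprehension collecting which (group, field) requirements it satisfies, then checks that every key of the flat REQUIRED table is in that set.
import Mathlib
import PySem

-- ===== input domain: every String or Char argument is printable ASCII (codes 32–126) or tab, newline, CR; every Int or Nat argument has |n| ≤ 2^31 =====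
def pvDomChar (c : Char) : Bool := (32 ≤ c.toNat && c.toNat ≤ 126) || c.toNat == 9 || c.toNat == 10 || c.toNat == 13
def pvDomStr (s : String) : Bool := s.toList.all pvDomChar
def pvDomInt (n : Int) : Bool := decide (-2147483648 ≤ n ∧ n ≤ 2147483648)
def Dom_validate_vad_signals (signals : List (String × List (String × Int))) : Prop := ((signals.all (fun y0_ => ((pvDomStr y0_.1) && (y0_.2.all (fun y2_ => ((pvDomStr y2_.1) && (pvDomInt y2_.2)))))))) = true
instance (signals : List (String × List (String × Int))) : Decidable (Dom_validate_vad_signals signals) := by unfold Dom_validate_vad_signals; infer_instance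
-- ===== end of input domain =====

-- B inverts A's traversal: instead of walking the fixed schema and looking each entry up in
-- the input, it scans the input once collecting the set of satisfied requirements, then asks
-- whether every requirement was met; same return value on every input of the domain.

-- ===== PORT A =====
-- dict lookup on an association list (first binding wins, the harness convention)
def pvGet {a : Type} (l : List (String × a)) (k : String) : Option a :=
  PySem.Dict.get? (PySem.Dict.mk l) k

-- A's nested `expected` schema dict, as an association list
def pvExpectedA : List (String × List (String × (Int × Int))) :=
  [("arousal_cues",
     [("rapid_editing", (0, 2)), ("physical_action", (0, 2)),
      ("emotional_outburst", (0, 2)), ("tense_confrontation", (0, 2)),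
      ("close_up_intensity", (0, 1))]),
   ("valence_cues",
     [("darkness_shadow", (0, 2)), ("death_loss", (0, 2)),
      ("joy_celebration", (0, 2)), ("threat_danger", (0, 2))]),
   ("neutral_indicators",
     [("establishing_shot", (0, 1)), ("static_dialogue", (0, 1)),
      ("scene_transition", (0, 1))])]

-- inner `for field, (min_v, max_v) in fields.items()` loop over one group's sub-dict
-- (isinstance(val, (int, float)) is always true here: values are Int by the type convention)
def pvInnerA (sub : List (String × Int)) : List (String × (Int × Int)) → Bool
  | [] => true
  | (field, (min_v, max_v)) :: fs =>
    match pvGet sub field with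
    | none => false                                   -- `field not in signals[group]`
    | some val =>
      if min_v ≤ val ∧ val ≤ max_v then pvInnerA sub fs else false

-- outer `for group, fields in expected.items()` loop
def pvOuterA (signals : List (String × List (String × Int))) :
    List (String × List (String × (Int × Int))) → Bool
  | [] => true
  | (group, fields) :: rest =>
    match pvGet signals group with
    | none => false                                   -- `group not in signals`
    | some sub => if pvInnerA sub fields then pvOuterA signals rest else false

def validate_vad_signals (signals : List (String × List (String × Int))) : Bool :=
  pvOuterA signals pvExpectedA

-- ===== PORT B =====
-- B's flat REQUIRED dict keyed by (group, field), as an association list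
def pvRequiredB : List ((String × String) × (Int × Int)) :=
  [(("arousal_cues", "rapid_editing"), (0, 2)),
   (("arousal_cues", "physical_action"), (0, 2)),
   (("arousal_cues", "emotional_outburst"), (0, 2)),
   (("arousal_cues", "tense_confrontation"), (0, 2)),
   (("arousal_cues", "close_up_intensity"), (0, 1)),
   (("valence_cues", "darkness_shadow"), (0, 2)),
   (("valence_cues", "death_loss"), (0, 2)),
   (("valence_cues", "joy_celebration"), (0, 2)),
   (("valence_cues", "threat_danger"), (0, 2)),
   (("neutral_indicators", "establishing_shot"), (0, 1)),
   (("neutral_indicators", "static_dialogue"), (0, 1)),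
   (("neutral_indicators", "scene_transition"), (0, 1))]

-- `.items()` of a dict represented as an association list: the distinct keys in order,
-- each with its first binding (exact for the harness's first-binding-wins convention)
def pvItems {a : Type} : List (String × a) → List (String × a)
  | [] => []
  | (k, v) :: rest => (k, v) :: pvItems (rest.filter (fun p => !(p.1 == k)))
termination_by l => l.length
decreasing_by
  simp only [List.length_cons, Nat.lt_succ_iff, List.length_unattach]
  exact le_trans (List.length_filter_le _ _) (by simp)

-- `REQUIRED.get((group, field))` / `(group, field) in REQUIRED and REQUIRED[(group, field)]…`
def pvBoundsB (key : String × String) : Option (Int × Int) :=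
  PySem.Dict.get? (PySem.Dict.mk pvRequiredB) key

-- the comprehension's condition: `(group, field) in REQUIRED and isinstance(val, (int, float))
-- and REQUIRED[(group, field)][0] <= val <= REQUIRED[(group, field)][1]`
-- (isinstance is always true: values are Int by the type convention)
def pvOkB (key : String × String) (v : Int) : Bool :=
  match pvBoundsB key with
  | none => false
  | some (lo, hi) => decide (lo ≤ v) && decide (v ≤ hi)

-- the set comprehension building `satisfied`
def pvSatisfiedB (signals : List (String × List (String × Int))) : PySem.Set (String × String) :=
  PySem.Set.ofList ((pvItems signals).flatMap (fun q =>
    ((pvItems q.2).filter (fun p => pvOkB (q.1, p.1) p.2)).map (fun p => (q.1, p.1))))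

def validate_vad_signals_alt (signals : List (String × List (String × Int))) : Bool :=
  let satisfied := pvSatisfiedB signals
  pvRequiredB.all (fun e => PySem.Set.contains satisfied e.1)   -- all(key in satisfied for key in REQUIRED)

-- ===== PRECONDITION & SPEC =====
def Spec_validate_vad_signals (signals : List (String × List (String × Int))) (out : Bool) : Prop := out = validate_vad_signals_alt signals
instance (signals : List (String × List (String × Int))) (out : Bool) : Decidable (Spec_validate_vad_signals signals out) := by unfold Spec_validate_vad_signals; infer_instance

-- ===== CLAIM (what is proved, stated in full; the proofs are below) =====
def Claim_equal_validate_vad_signals : Prop := ∀ (signals : List (String × List (String × Int))), Dom_validate_vad_signals signals → Spec_validate_vad_signals signals (validate_vad_signals signals)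

-- ===== LEMMAS AND PROOFS =====

-- one requirement, checked by lookups into the input (the shape A's nested loops take per entry)
def pvLookOk (signals : List (String × List (String × Int)))
    (e : (String × String) × (Int × Int)) : Bool :=
  match pvGet signals e.1.1 with
  | none => false
  | some sub =>
    match pvGet sub e.1.2 with
    | none => false
    | some v => decide (e.2.1 ≤ v) && decide (v ≤ e.2.2)

-- filtering a key away does not change lookups of other keys
theorem pvGet_filter_ne {a : Type} (l : List (String × a)) (k0 k : String) (h : k0 ≠ k) :
    pvGet (l.filter (fun p => !(p.1 == k0))) k = pvGet l k := by
  induction l with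
  | nil => rfl
  | cons p rest ih =>
    obtain ⟨k1, v1⟩ := p
    by_cases h1 : k1 = k0
    · subst h1
      simpa [List.filter_cons, pvGet, PySem.Dict.get?_mk_cons, h] using ih
    · by_cases h2 : k1 = k
      · subst h2
        simp [pvGet, PySem.Dict.get?_mk_cons, h1]
      · simpa [List.filter_cons, pvGet, PySem.Dict.get?_mk_cons, h1, h2] using ih

-- after filtering a key away, looking it up fails
theorem pvGet_filter_self {a : Type} (l : List (String × a)) (k0 : String) :
    pvGet (l.filter (fun p => !(p.1 == k0))) k0 = none := by
  induction l with
  | nil => rfl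
  | cons p rest ih =>
    obtain ⟨k1, v1⟩ := p
    by_cases h1 : k1 = k0
    · simpa [List.filter_cons, h1] using ih
    · simpa [List.filter_cons, pvGet, PySem.Dict.get?_mk_cons, h1] using ih

-- the `.items()` view holds exactly the (key, first binding) pairs
theorem mem_pvItems {a : Type} (l : List (String × a)) (k : String) (v : a) :
    (k, v) ∈ pvItems l ↔ pvGet l k = some v := by
  suffices H : ∀ (n : Nat) (l : List (String × a)), l.length ≤ n →
      ((k, v) ∈ pvItems l ↔ pvGet l k = some v) from H l.length l le_rfl
  intro n
  induction n with
  | zero =>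
    intro l hl
    rw [List.length_eq_zero_iff.mp (Nat.le_zero.mp hl)]
    simp [pvItems, pvGet, PySem.Dict.get?]
  | succ n ih =>
    intro l hl
    cases l with
    | nil => simp [pvItems, pvGet, PySem.Dict.get?]
    | cons p rest =>
      obtain ⟨k0, v0⟩ := p
      have hrec := ih (rest.filter (fun p => !(p.1 == k0)))
        (le_trans (List.length_filter_le _ _) (Nat.le_of_succ_le_succ hl))
      rw [pvItems]
      by_cases hk : k0 = k
      · subst hk
        simp only [List.mem_cons, hrec, pvGet_filter_self]
        simp [pvGet, PySem.Dict.get?_mk_cons, Prod.ext_iff, eq_comm]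
      · simp only [List.mem_cons, hrec, pvGet_filter_ne _ _ _ hk]
        simp [pvGet, PySem.Dict.get?_mk_cons, beq_iff_eq, hk, Prod.ext_iff, Ne.symm hk]

-- == A's side: the nested loops equal one pass of lookups over the flat requirement list ==

theorem pvInner_eq (signals : List (String × List (String × Int)))
    (g : String) (sub : List (String × Int))
    (h : pvGet signals g = some sub)
    (fs : List (String × (Int × Int))) :
    pvInnerA sub fs
      = (fs.map (fun p => ((g, p.1), p.2))).all (pvLookOk signals) := by
  induction fs with
  | nil => rfl
  | cons p fs ih =>
    obtain ⟨field, min_v, max_v⟩ := p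
    simp only [pvInnerA, List.map_cons, List.all_cons, pvLookOk, h]
    cases hf : pvGet sub field with
    | none => simp
    | some v =>
      dsimp only
      by_cases hle : min_v ≤ v ∧ v ≤ max_v
      · simp [hle.1, hle.2, ih]
      · rw [if_neg hle]
        rcases not_and_or.mp hle with h1 | h1 <;> simp [h1]

theorem pvOuter_eq (signals : List (String × List (String × Int)))
    (gs : List (String × List (String × (Int × Int))))
    (hne : ∀ p ∈ gs, p.2 ≠ []) :
    pvOuterA signals gs
      = (gs.flatMap (fun q => q.2.map (fun p => ((q.1, p.1), p.2)))).all
          (pvLookOk signals) := by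
  induction gs with
  | nil => rfl
  | cons q rest ih =>
    obtain ⟨g, fields⟩ := q
    simp only [pvOuterA, List.flatMap_cons, List.all_append]
    cases h : pvGet signals g with
    | none =>
      have hne' : fields ≠ [] := hne (g, fields) (List.mem_cons_self ..)
      cases fields with
      | nil => exact absurd rfl hne'
      | cons p fs =>
        obtain ⟨field, min_v, max_v⟩ := p
        simp [pvLookOk, h]
    | some sub =>
      dsimp only
      rw [pvInner_eq signals g sub h fields,
          ih (fun p hp => hne p (List.mem_cons_of_mem _ hp))]
      cases (fields.map (fun p => ((g, p.1), p.2))).all (pvLookOk signals) <;> simp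

-- the flat requirement table is exactly the flattening of A's nested schema
theorem pvRequiredB_eq :
    pvRequiredB = pvExpectedA.flatMap (fun q => q.2.map (fun p => ((q.1, p.1), p.2))) := by
  decide

theorem pvA_eq_all (signals : List (String × List (String × Int))) :
    validate_vad_signals signals = pvRequiredB.all (pvLookOk signals) := by
  rw [validate_vad_signals, pvOuter_eq signals pvExpectedA (by decide), ← pvRequiredB_eq]

-- == B's side: membership in `satisfied` is the same lookup check, per requirement ==

theorem pvBounds_of_mem (e : (String × String) × (Int × Int)) (he : e ∈ pvRequiredB) :
    pvBoundsB e.1 = some e.2 := by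
  fin_cases he <;> decide

-- pvLookOk, characterised by its two lookups
theorem pvLookOk_iff (signals : List (String × List (String × Int)))
    (g f : String) (lo hi : Int) :
    pvLookOk signals ((g, f), (lo, hi)) = true
      ↔ ∃ sub, pvGet signals g = some sub ∧
          ∃ v, pvGet sub f = some v ∧ lo ≤ v ∧ v ≤ hi := by
  unfold pvLookOk
  cases pvGet signals g with
  | none => simp
  | some sub =>
    cases h2 : pvGet sub f with
    | none => simp [h2]
    | some v => simp [h2]

theorem mem_satisfied_iff (signals : List (String × List (String × Int)))
    (e : (String × String) × (Int × Int)) (he : e ∈ pvRequiredB) :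
    e.1 ∈ pvSatisfiedB signals ↔ pvLookOk signals e = true := by
  obtain ⟨⟨g, f⟩, lo, hi⟩ := e
  have hb : pvBoundsB (g, f) = some (lo, hi) := pvBounds_of_mem _ he
  rw [pvLookOk_iff]
  simp only [pvSatisfiedB, PySem.Set.mem_ofList, List.mem_flatMap, List.mem_map,
    List.mem_filter]
  constructor
  · rintro ⟨⟨g', sub⟩, hq, ⟨f', v⟩, ⟨⟨hp, hok⟩, heq⟩⟩
    rw [Prod.mk.injEq] at heq
    obtain ⟨rfl, rfl⟩ := heq
    simp only [pvOkB, hb, Bool.and_eq_true, decide_eq_true_eq] at hok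
    exact ⟨sub, (mem_pvItems _ _ _).mp hq, v, (mem_pvItems _ _ _).mp hp, hok.1, hok.2⟩
  · rintro ⟨sub, h1, v, h2, hlo, hhi⟩
    refine ⟨(g, sub), (mem_pvItems _ _ _).mpr h1,
      ⟨(f, v), ⟨⟨(mem_pvItems _ _ _).mpr h2, ?_⟩, rfl⟩⟩⟩
    simp [pvOkB, hb, hlo, hhi]

-- ===== VERDICT (by name: the statement is the Claim_ definition above) =====
theorem validate_vad_signals_spec : Claim_equal_validate_vad_signals := by
  intro signals _
  unfold Spec_validate_vad_signals validate_vad_signals_alt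
  rw [pvA_eq_all]
  rw [Bool.eq_iff_iff, List.all_eq_true, List.all_eq_true]
  refine forall_congr' fun e => forall_congr' fun he => ?_
  rw [PySem.Set.contains_iff, mem_satisfied_iff signals e he]
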